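-- pv_equiv track=rewrite | github.com/krishnakumarbhat/Research_proj | cv/autoresearch/cv_bench/real_data.py | _normalise_stem
-- ===== SOURCE A (Python) =====
-- def _normalise_stem(name: str) -> str:
--     stem = name.lower().strip()
--     changed = True
--     while changed:
--         changed = False
--         for suffix in [".png", ".jpg", ".jpeg", ".bmp", ".tif", ".tiff", ".xcf"]:
--             if stem.endswith(suffix):
--                 stem = stem[: -len(suffix)].strip()
--                 changed = True
--     return stem
-- ===== SOURCE B (Python) =====
-- _WS = " \t\n\r\x0b\x0c"
-- _REV_SUFFIXES = ("gepj.", "ffit.", "gnp.", "gpj.", "pmb.", "fit.", "fcx.")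
--
-- def _normalise_stem(name: str) -> str:
--     # single backward scan over the reversed, lower-cased string:
--     # skip whitespace, peel one reversed suffix, repeat; no re-slicing passes
--     rev = name.lower().lstrip()[::-1]
--     n = len(rev)
--     k = 0
--     while True:
--         while k < n and rev[k] in _WS:
--             k += 1
--         for s in _REV_SUFFIXES:
--             if rev.startswith(s, k):
--                 k += len(s)
--                 break
--         else:
--             break
--     return rev[k:][::-1]
-- ===== Notes on version B (the rewrite author's own statement) =====
-- stated objective: alternative
-- what changed: Replaces the while-changed convergence loop that re-slices and re-strips the whole string after every suffix removal with a single backward scan over the reversed lower-cased string that skips whitespace runs and peels reversed suffixes by advancing an index.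
import Mathlib
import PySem

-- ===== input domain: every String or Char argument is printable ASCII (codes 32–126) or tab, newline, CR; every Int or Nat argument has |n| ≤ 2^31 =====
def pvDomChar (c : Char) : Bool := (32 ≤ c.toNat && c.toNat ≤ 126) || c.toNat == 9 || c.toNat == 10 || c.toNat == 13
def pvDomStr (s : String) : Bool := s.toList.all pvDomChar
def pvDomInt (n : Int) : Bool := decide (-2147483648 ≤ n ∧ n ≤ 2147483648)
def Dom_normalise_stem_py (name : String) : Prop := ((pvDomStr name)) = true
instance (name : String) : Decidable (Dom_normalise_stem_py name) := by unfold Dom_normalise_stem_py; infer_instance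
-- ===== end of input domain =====

-- B replaces A's while-changed convergence loop (which re-slices and re-strips the string after
-- every suffix removal) with a single backward scan over the reversed lower-cased string.


-- ===== PORT A =====
-- the literal suffix list of A's inner for-loop
def pvSuffixesA : List (List Char) :=
  [".png".toList, ".jpg".toList, ".jpeg".toList, ".bmp".toList, ".tif".toList, ".tiff".toList, ".xcf".toList]

-- one iteration of A's inner `for suffix in [...]` body on the state (stem, changed)
def pvStepA (st : List Char × Bool) (suffix : List Char) : List Char × Bool :=
  if PySem.Chars.endswith st.1 suffix then
    (PySem.Chars.strip (PySem.Chars.slice st.1 none (some (-(suffix.length : Int)))), true)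
  else st

-- length bound for A's inner pass, cited by pvLoopA's termination proof
theorem pvFoldA_len (L : List (List Char)) (hL : ∀ s ∈ L, s ≠ []) (st : List Char) (c : Bool) :
    (L.foldl pvStepA (st, c)).1.length ≤ st.length ∧
    ((L.foldl pvStepA (st, c)).2 = true → c = true ∨ (L.foldl pvStepA (st, c)).1.length < st.length) := by
  induction L generalizing st c with
  | nil => simp
  | cons s L ih =>
    have hs : s ≠ [] := hL s (by simp)
    have hL' : ∀ t ∈ L, t ≠ [] := fun t ht => hL t (by simp [ht])
    simp only [List.foldl_cons]
    by_cases h : PySem.Chars.endswith st s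
    · have hsuf : s <:+ st := by
        have := PySem.Chars.endswith_iff (s := st) (p := s)
        exact this.mp h
      have hslen : 0 < s.length := List.length_pos_iff.mpr hs
      have hle : s.length ≤ st.length := hsuf.length_le
      have hstep : pvStepA (st, c) s =
          (PySem.Chars.strip (PySem.Chars.slice st none (some (-(s.length : Int)))), true) := by
        simp [pvStepA, h]
      rw [hstep]
      set st' := PySem.Chars.strip (PySem.Chars.slice st none (some (-(s.length : Int)))) with hst'
      have hlen' : st'.length < st.length := by
        have h1 : PySem.Chars.slice st none (some (-(s.length : Int))) = st.take (st.length - s.length) := by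
          simp only [PySem.Chars.slice_eq_listSlice]
          exact PySem.List.slice_to_neg_natCast st s.length hslen
        have h2 : st'.length ≤ (st.take (st.length - s.length)).length := by
          rw [hst', h1]
          simp only [PySem.Chars.strip, PySem.Chars.rstrip, PySem.Chars.lstrip]
          calc (List.dropWhile PySem.Chars.isspace
                  (List.dropWhile PySem.Chars.isspace (st.take (st.length - s.length))).reverse).reverse.length
              ≤ (List.dropWhile PySem.Chars.isspace (st.take (st.length - s.length))).reverse.length := by
                rw [List.length_reverse]; exact List.length_dropWhile_le _ _
            _ ≤ (st.take (st.length - s.length)).length := by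
                rw [List.length_reverse]; exact List.length_dropWhile_le _ _
        have h3 : (st.take (st.length - s.length)).length ≤ st.length - s.length := by
          simp [List.length_take]
        omega
      have ihr := ih hL' st' true
      refine ⟨le_trans ihr.1 (le_of_lt hlen'), fun _ => Or.inr ?_⟩
      exact lt_of_le_of_lt ihr.1 hlen'
    · have hstep : pvStepA (st, c) s = (st, c) := by simp [pvStepA, h]
      rw [hstep]
      exact ih hL' st c

-- A's outer `while changed` loop
def pvLoopA (stem : List Char) : List Char :=
  if h : (pvSuffixesA.foldl pvStepA (stem, false)).2 then
    pvLoopA (pvSuffixesA.foldl pvStepA (stem, false)).1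
  else
    (pvSuffixesA.foldl pvStepA (stem, false)).1
termination_by stem.length
decreasing_by
  have := (pvFoldA_len pvSuffixesA (by decide) stem false).2 h
  simpa using this

def normalise_stem_py (name : String) : String :=
  String.ofList (pvLoopA (PySem.Chars.strip (PySem.Chars.lower name.toList)))

-- ===== PORT B =====
-- B's _WS constant
def pvWsB : List Char := [' ', '\t', '\n', '\r', Char.ofNat 11, Char.ofNat 12]

-- B's _REV_SUFFIXES constant
def pvRevSuffixesB : List (List Char) :=
  ["gepj.".toList, "ffit.".toList, "gnp.".toList, "gpj.".toList, "pmb.".toList, "fit.".toList, "fcx.".toList]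

-- the inner `while k < n and rev[k] in _WS` whitespace skip of B
def pvSkipWsB (rev : List Char) : List Char := rev.dropWhile (fun c => pvWsB.contains c)

-- B's scan loop: the returned list is rev[k:] for the final index k
def pvPeelB (rev : List Char) : List Char :=
  match hf : pvRevSuffixesB.find? (fun s => PySem.Chars.startswith (pvSkipWsB rev) s) with
  | some s => pvPeelB ((pvSkipWsB rev).drop s.length)
  | none => pvSkipWsB rev
termination_by rev.length
decreasing_by
  have hmem : s ∈ pvRevSuffixesB := List.mem_of_find?_eq_some hf
  have hp := List.find?_some hf
  have hpre : s <+: pvSkipWsB rev := List.isPrefixOf_iff_prefix.mp (by simpa [PySem.Chars.startswith] using hp)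
  have hslen : 0 < s.length := by
    have : ∀ t ∈ pvRevSuffixesB, 0 < t.length := by decide
    exact this s hmem
  have h1 : s.length ≤ (pvSkipWsB rev).length := hpre.length_le
  have h2 : (pvSkipWsB rev).length ≤ rev.length := List.length_dropWhile_le _ _
  simp only [List.length_drop]
  omega

def normalise_stem_py_alt (name : String) : String :=
  String.ofList ((pvPeelB ((PySem.Chars.lstrip (PySem.Chars.lower name.toList)).reverse)).reverse)

-- ===== PRECONDITION & SPEC =====
def Spec_normalise_stem_py (name : String) (out : String) : Prop := out = normalise_stem_py_alt name
instance (name : String) (out : String) : Decidable (Spec_normalise_stem_py name out) := by unfold Spec_normalise_stem_py; infer_instance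

-- ===== CLAIM (what is proved, stated in full; the proofs are below) =====
def Claim_equal_normalise_stem_py : Prop := ∀ (name : String), Dom_normalise_stem_py name → Spec_normalise_stem_py name (normalise_stem_py name)

-- ===== LEMMAS AND PROOFS =====

-- canonical greedy peel, the common characterisation of both loops
def pvG (st : List Char) : List Char :=
  match hf : pvSuffixesA.find? (fun s => s.isSuffixOf st) with
  | some s => pvG (PySem.Chars.rstrip (st.take (st.length - s.length)))
  | none => st
termination_by st.length
decreasing_by
  have hmem : s ∈ pvSuffixesA := List.mem_of_find?_eq_some hf
  have hp := List.find?_some hf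
  have hsuf : s <:+ st := List.isSuffixOf_iff_suffix.mp (by simpa using hp)
  have hslen : 0 < s.length := by
    have : ∀ t ∈ pvSuffixesA, 0 < t.length := by decide
    exact this s hmem
  have h1 : s.length ≤ st.length := hsuf.length_le
  have h2 : (PySem.Chars.rstrip (st.take (st.length - s.length))).length
      ≤ (st.take (st.length - s.length)).length := by
    simp only [PySem.Chars.rstrip]
    rw [List.length_reverse]
    exact le_trans (List.length_dropWhile_le _ _) (by rw [List.length_reverse])
  have h3 : (st.take (st.length - s.length)).length ≤ st.length - s.length := by
    simp [List.length_take]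
  omega

theorem pvG_eq_some (st s : List Char)
    (hfind : pvSuffixesA.find? (fun x => x.isSuffixOf st) = some s) :
    pvG st = pvG (PySem.Chars.rstrip (st.take (st.length - s.length))) := by
  rw [pvG.eq_def]
  split
  next s' hf' => rw [hfind] at hf'; cases hf'; rfl
  next hf' => rw [hfind] at hf'; cases hf'

theorem pvG_eq_none (st : List Char)
    (hfind : pvSuffixesA.find? (fun x => x.isSuffixOf st) = none) :
    pvG st = st := by
  rw [pvG.eq_def]
  split
  next s' hf' => rw [hfind] at hf'; cases hf'
  next hf' => rfl

theorem pv_uniq_suffix (t s1 s2 : List Char) (h1 : s1 ∈ pvSuffixesA) (h2 : s2 ∈ pvSuffixesA)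
    (hs1 : s1 <:+ t) (hs2 : s2 <:+ t) : s1 = s2 := by
  have hkey : ∀ a ∈ pvSuffixesA, ∀ b ∈ pvSuffixesA, a <:+ b → a = b := by decide
  rcases List.suffix_or_suffix_of_suffix hs1 hs2 with h | h
  · exact hkey s1 h1 s2 h2 h
  · exact (hkey s2 h2 s1 h1 h).symm

theorem pv_find?_unique_congr {α : Type} (p : α → Bool) (L L' : List α)
    (hmem : ∀ a ∈ L', a ∈ L) (hmem' : ∀ a ∈ L, a ∈ L')
    (huniq : ∀ a ∈ L, ∀ b ∈ L, p a = true → p b = true → a = b) :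
    L.find? p = L'.find? p := by
  cases h : L.find? p with
  | none =>
    cases h' : L'.find? p with
    | none => rfl
    | some b =>
      have hb := List.find?_some h'
      have hbm := hmem b (List.mem_of_find?_eq_some h')
      have := List.find?_eq_none.mp h b hbm
      simp [hb] at this
  | some a =>
    have ha := List.find?_some h
    have ham := List.mem_of_find?_eq_some h
    cases h' : L'.find? p with
    | none =>
      have := List.find?_eq_none.mp h' a (hmem' a ham)
      simp [ha] at this
    | some b =>
      have hb := List.find?_some h'
      have hbm := hmem b (List.mem_of_find?_eq_some h')
      rw [huniq a ham b hbm ha hb]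

theorem pv_find?_eq_some_of_unique (t : List Char) (s : List Char) (hmem : s ∈ pvSuffixesA)
    (hs : s <:+ t) : pvSuffixesA.find? (fun x => x.isSuffixOf t) = some s := by
  cases h : pvSuffixesA.find? (fun x => x.isSuffixOf t) with
  | none =>
    have := List.find?_eq_none.mp h s hmem
    simp [List.isSuffixOf_iff_suffix, hs] at this
  | some a =>
    have ha := List.find?_some h
    have ham := List.mem_of_find?_eq_some h
    rw [pv_uniq_suffix t a s ham hmem (List.isSuffixOf_iff_suffix.mp ha) hs]

theorem pv_find?_map (f : List Char → List Char) (l : List (List Char)) (p : List Char → Bool) :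
    (l.map f).find? p = (l.find? (fun a => p (f a))).map f := by
  induction l with
  | nil => rfl
  | cons x xs ih => simp only [List.map_cons, List.find?]; by_cases h : p (f x) <;> simp [h, ih]

-- B's reversed-suffix search corresponds to A's suffix search
theorem pv_findR_eq (t : List Char) :
    pvRevSuffixesB.find? (fun s => PySem.Chars.startswith t.reverse s)
      = (pvSuffixesA.find? (fun s => s.isSuffixOf t)).map List.reverse := by
  have hB : pvRevSuffixesB =
      [".jpeg".toList, ".tiff".toList, ".png".toList, ".jpg".toList, ".bmp".toList, ".tif".toList, ".xcf".toList].map List.reverse := by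
    decide
  rw [hB, pv_find?_map]
  have hpq : ∀ (s : List Char), PySem.Chars.startswith t.reverse s.reverse = s.isSuffixOf t := by
    intro s; rfl
  simp only [hpq]
  congr 1
  exact (pv_find?_unique_congr _ pvSuffixesA _
    (by decide) (by decide)
    (fun a ha b hb hpa hpb =>
      pv_uniq_suffix t a b ha hb (List.isSuffixOf_iff_suffix.mp hpa) (List.isSuffixOf_iff_suffix.mp hpb))).symm

-- whitespace test congruence on the domain
theorem pv_ws_eq (c : Char) (h : pvDomChar c = true) :
    pvWsB.contains c = PySem.Chars.isspace c := by
  have hinj : ∀ d : Char, (c = d) ↔ c.toNat = d.toNat :=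
    fun d => ⟨fun h => h ▸ rfl, fun h => Char.ext (UInt32.toNat_inj.mp h)⟩
  have hdom : (32 ≤ c.toNat ∧ c.toNat ≤ 126) ∨ c.toNat = 9 ∨ c.toNat = 10 ∨ c.toNat = 13 := by
    simp only [pvDomChar, Bool.or_eq_true, Bool.and_eq_true, decide_eq_true_eq, beq_iff_eq] at h
    omega
  have hcontains : pvWsB.contains c = true ↔
      (c.toNat = 32 ∨ c.toNat = 9 ∨ c.toNat = 10 ∨ c.toNat = 13 ∨ c.toNat = 11 ∨ c.toNat = 12) := by
    have e1 : (' ' : Char).toNat = 32 := rfl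
    have e2 : ('\t' : Char).toNat = 9 := rfl
    have e3 : ('\n' : Char).toNat = 10 := rfl
    have e4 : ('\r' : Char).toNat = 13 := rfl
    have e5 : (Char.ofNat 11).toNat = 11 := rfl
    have e6 : (Char.ofNat 12).toNat = 12 := rfl
    simp [pvWsB, hinj, e1, e2, e3, e4, e5, e6]
  have hisspace : PySem.Chars.isspace c = true ↔
      (c.toNat = 32 ∨ (9 ≤ c.toNat ∧ c.toNat ≤ 13) ∨ (28 ≤ c.toNat ∧ c.toNat ≤ 31) ∨
        c.toNat = 133 ∨ c.toNat = 160 ∨ c.toNat = 5760 ∨ (8192 ≤ c.toNat ∧ c.toNat ≤ 8202) ∨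
        c.toNat = 8232 ∨ c.toNat = 8233 ∨ c.toNat = 8239 ∨ c.toNat = 8287 ∨ c.toNat = 12288) := by
    simp only [PySem.Chars.isspace, Bool.or_eq_true, Bool.and_eq_true, decide_eq_true_eq]
    constructor <;> (intro hh; omega)
  cases hb : pvWsB.contains c with
  | true =>
    have hd := hcontains.mp hb
    exact ((hisspace.mpr (by omega))).symm
  | false =>
    cases hi : PySem.Chars.isspace c with
    | true =>
      have hd := hisspace.mp hi
      have : pvWsB.contains c = true := hcontains.mpr (by omega)
      rw [hb] at this
      exact absurd this (by simp)
    | false => rfl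

theorem pv_dropWhile_congr (p q : Char → Bool) (l : List Char) (h : ∀ c ∈ l, p c = q c) :
    l.dropWhile p = l.dropWhile q := by
  induction l with
  | nil => rfl
  | cons x xs ih =>
    have hx := h x (by simp)
    simp only [List.dropWhile_cons, hx]
    by_cases hq : q x
    · simp [hq]; exact ih fun c hc => h c (by simp [hc])
    · simp [hq]

theorem pv_lstrip_take (st : List Char) (k : Nat) (h : PySem.Chars.lstrip st = st) :
    PySem.Chars.lstrip (st.take k) = st.take k := by
  cases st with
  | nil => simp [PySem.Chars.lstrip]
  | cons a l =>
    cases k with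
    | zero => simp [PySem.Chars.lstrip]
    | succ k =>
      have ha : PySem.Chars.isspace a = false := by
        cases hx : PySem.Chars.isspace a with
        | false => rfl
        | true =>
          rw [PySem.Chars.lstrip, List.dropWhile_cons_of_pos hx] at h
          have hlen := congrArg List.length h
          have hle := List.length_dropWhile_le PySem.Chars.isspace l
          simp at hlen
          omega
      simp [PySem.Chars.lstrip, ha]

theorem pv_rstrip_prefix (l : List Char) : PySem.Chars.rstrip l <+: l := by
  rw [PySem.Chars.rstrip]
  conv_rhs => rw [show l = l.reverse.reverse by simp]
  exact List.reverse_prefix.mpr (by simpa using List.dropWhile_suffix PySem.Chars.isspace)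

theorem pv_lstrip_rstrip (st : List Char) (h : PySem.Chars.lstrip st = st) :
    PySem.Chars.lstrip (PySem.Chars.rstrip st) = PySem.Chars.rstrip st := by
  obtain ⟨hpre⟩ : ∃ _ : PySem.Chars.rstrip st <+: st, True := ⟨pv_rstrip_prefix st, trivial⟩
  rw [List.prefix_iff_eq_take.mp hpre]
  exact pv_lstrip_take st _ h

theorem pv_rstrip_idem (st : List Char) :
    PySem.Chars.rstrip (PySem.Chars.rstrip st) = PySem.Chars.rstrip st := by
  simp [PySem.Chars.rstrip, List.dropWhile_idempotent]

-- A's pass characterised against pvG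
theorem pv_foldA_spec (L : List (List Char)) (hL : ∀ s ∈ L, s ∈ pvSuffixesA)
    (st : List Char) (c : Bool)
    (h1 : PySem.Chars.lstrip st = st) (h2 : PySem.Chars.rstrip st = st) :
    PySem.Chars.lstrip (L.foldl pvStepA (st, c)).1 = (L.foldl pvStepA (st, c)).1 ∧
    PySem.Chars.rstrip (L.foldl pvStepA (st, c)).1 = (L.foldl pvStepA (st, c)).1 ∧
    pvG (L.foldl pvStepA (st, c)).1 = pvG st ∧
    ((L.foldl pvStepA (st, c) = (st, c) ∧ ∀ s ∈ L, s.isSuffixOf st = false) ∨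
      ((L.foldl pvStepA (st, c)).2 = true ∧ (L.foldl pvStepA (st, c)).1.length < st.length)) := by
  induction L generalizing st c with
  | nil => exact ⟨h1, h2, rfl, Or.inl ⟨rfl, by simp⟩⟩
  | cons s L ih =>
    have hsS : s ∈ pvSuffixesA := hL s (by simp)
    have hL' : ∀ t ∈ L, t ∈ pvSuffixesA := fun t ht => hL t (by simp [ht])
    simp only [List.foldl_cons]
    by_cases hmatch : PySem.Chars.endswith st s = true
    · have hsuf : s <:+ st := (PySem.Chars.endswith_iff st s).mp hmatch
      have hslen : 0 < s.length := by
        have hall : ∀ t ∈ pvSuffixesA, 0 < t.length := by decide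
        exact hall s hsS
      have hlen : s.length ≤ st.length := hsuf.length_le
      have hslice : PySem.Chars.slice st none (some (-(s.length : Int)))
          = st.take (st.length - s.length) := by
        simp only [PySem.Chars.slice_eq_listSlice]
        exact PySem.List.slice_to_neg_natCast st s.length hslen
      have hstep : pvStepA (st, c) s
          = (PySem.Chars.rstrip (st.take (st.length - s.length)), true) := by
        simp only [pvStepA, hmatch, if_pos]
        rw [hslice]
        rw [show ∀ l, PySem.Chars.strip l = PySem.Chars.rstrip (PySem.Chars.lstrip l) from fun _ => rfl]
        rw [pv_lstrip_take st _ h1]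
      rw [hstep]
      have h1' : PySem.Chars.lstrip (PySem.Chars.rstrip (st.take (st.length - s.length)))
          = PySem.Chars.rstrip (st.take (st.length - s.length)) :=
        pv_lstrip_rstrip _ (pv_lstrip_take st _ h1)
      have h2' := pv_rstrip_idem (st.take (st.length - s.length))
      have hlen' : (PySem.Chars.rstrip (st.take (st.length - s.length))).length < st.length := by
        have ha := (pv_rstrip_prefix (st.take (st.length - s.length))).length_le
        have hb : (st.take (st.length - s.length)).length ≤ st.length - s.length := by
          simp [List.length_take]
        omega
      have hGstep : pvG st = pvG (PySem.Chars.rstrip (st.take (st.length - s.length))) :=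
        pvG_eq_some st s (pv_find?_eq_some_of_unique st s hsS hsuf)
      obtain ⟨i1, i2, i3, i4⟩ := ih hL' (PySem.Chars.rstrip (st.take (st.length - s.length))) true h1' h2'
      refine ⟨i1, i2, by rw [i3, ← hGstep], Or.inr ?_⟩
      rcases i4 with ⟨he, _⟩ | ⟨ht, hl⟩
      · rw [he]; exact ⟨rfl, hlen'⟩
      · exact ⟨ht, lt_trans hl hlen'⟩
    · have hstep : pvStepA (st, c) s = (st, c) := by
        simp [pvStepA, hmatch]
      rw [hstep]
      obtain ⟨i1, i2, i3, i4⟩ := ih hL' st c h1 h2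
      refine ⟨i1, i2, i3, ?_⟩
      rcases i4 with ⟨he, hall⟩ | hB
      · refine Or.inl ⟨he, fun t ht => ?_⟩
        rcases List.mem_cons.mp ht with rfl | ht'
        · have : PySem.Chars.endswith st t = false := by
            cases hx : PySem.Chars.endswith st t with
            | false => rfl
            | true => exact absurd hx hmatch
          simpa [PySem.Chars.endswith] using this
        · exact hall t ht'
      · exact Or.inr hB

theorem pv_loopA_eq_G_aux (n : Nat) : ∀ st : List Char, st.length ≤ n →
    PySem.Chars.lstrip st = st → PySem.Chars.rstrip st = st → pvLoopA st = pvG st := by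
  induction n with
  | zero =>
    intro st hn h1 h2
    obtain ⟨i1, i2, i3, i4⟩ := pv_foldA_spec pvSuffixesA (fun _ h => h) st false h1 h2
    rw [pvLoopA.eq_def]
    rcases i4 with ⟨he, hall⟩ | ⟨ht, hl⟩
    · rw [he]
      rw [dif_neg (by simp)]
      exact (pvG_eq_none st (List.find?_eq_none.mpr (by
        intro x hx; simp [hall x hx]))).symm
    · omega
  | succ n ih =>
    intro st hn h1 h2
    obtain ⟨i1, i2, i3, i4⟩ := pv_foldA_spec pvSuffixesA (fun _ h => h) st false h1 h2
    rw [pvLoopA.eq_def]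
    rcases i4 with ⟨he, hall⟩ | ⟨ht, hl⟩
    · rw [he]
      rw [dif_neg (by simp)]
      exact (pvG_eq_none st (List.find?_eq_none.mpr (by
        intro x hx; simp [hall x hx]))).symm
    · rw [dif_pos ht]
      rw [ih _ (by omega) i1 i2, i3]

theorem pv_loopA_eq_G (st : List Char)
    (h1 : PySem.Chars.lstrip st = st) (h2 : PySem.Chars.rstrip st = st) :
    pvLoopA st = pvG st :=
  pv_loopA_eq_G_aux st.length st le_rfl h1 h2

theorem pv_lowerChar_dom (c : Char) (h : pvDomChar c = true) :
    pvDomChar (PySem.Chars.lowerChar c) = true := by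
  rw [PySem.Chars.lowerChar]
  by_cases hu : PySem.Chars.isupper c = true
  · rw [if_pos hu]
    have hAZ : 65 ≤ c.toNat ∧ c.toNat ≤ 90 := by
      simp only [PySem.Chars.isupper, Bool.and_eq_true, decide_eq_true_eq, Char.le_def,
        UInt32.le_iff_toNat_le] at hu
      exact hu
    have hv : (Char.ofNat (c.toNat + 32)).toNat = c.toNat + 32 := by
      have h32 : c.toNat + 32 < 55296 := by omega
      simp [Char.ofNat, Char.ofNatAux, Nat.isValidChar, h32]
      omega
    simp only [pvDomChar, Bool.or_eq_true, Bool.and_eq_true, decide_eq_true_eq, beq_iff_eq, hv]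
    omega
  · rw [if_neg hu]; exact h

theorem pv_skipWs_eq (st : List Char) (hd : ∀ c ∈ st, pvDomChar c = true) :
    pvSkipWsB st.reverse = (PySem.Chars.rstrip st).reverse := by
  rw [pvSkipWsB, PySem.Chars.rstrip, List.reverse_reverse]
  exact pv_dropWhile_congr _ _ _ (fun c hc => pv_ws_eq c (hd c (List.mem_reverse.mp hc)))

theorem pv_peelB_eq_G_aux (n : Nat) : ∀ st : List Char, st.length ≤ n →
    (∀ c ∈ st, pvDomChar c = true) →
    pvPeelB st.reverse = (pvG (PySem.Chars.rstrip st)).reverse := by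
  induction n using Nat.strong_induction_on with
  | _ n ih =>
    intro st hn hd
    have ht_pre := pv_rstrip_prefix st
    have hskip : pvSkipWsB st.reverse = (PySem.Chars.rstrip st).reverse := pv_skipWs_eq st hd
    rw [pvPeelB.eq_def]
    split
    next s' hf' =>
      rw [hskip, pv_findR_eq (PySem.Chars.rstrip st)] at hf'
      obtain ⟨s, hsfind, rfl⟩ := Option.map_eq_some_iff.mp hf'
      have hsS : s ∈ pvSuffixesA := List.mem_of_find?_eq_some hsfind
      have hsuf : s <:+ PySem.Chars.rstrip st :=
        List.isSuffixOf_iff_suffix.mp (by simpa using List.find?_some hsfind)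
      have hslen : 0 < s.length := by
        have hall : ∀ t ∈ pvSuffixesA, 0 < t.length := by decide
        exact hall s hsS
      have hlen : s.length ≤ (PySem.Chars.rstrip st).length := hsuf.length_le
      have htlen : (PySem.Chars.rstrip st).length ≤ st.length := ht_pre.length_le
      rw [hskip, List.length_reverse, List.drop_reverse]
      have hd2 : ∀ c ∈ (PySem.Chars.rstrip st).take ((PySem.Chars.rstrip st).length - s.length),
          pvDomChar c = true := fun c hc =>
        hd c (ht_pre.sublist.mem (List.mem_of_mem_take hc))
      have hlen2 : ((PySem.Chars.rstrip st).take ((PySem.Chars.rstrip st).length - s.length)).length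
          < st.length := by
        simp only [List.length_take]
        omega
      rw [ih ((PySem.Chars.rstrip st).take ((PySem.Chars.rstrip st).length - s.length)).length
        (by omega) _ le_rfl hd2]
      congr 1
      exact (pvG_eq_some (PySem.Chars.rstrip st) s hsfind).symm
    next hf' =>
      rw [hskip, pv_findR_eq (PySem.Chars.rstrip st)] at hf'
      rw [hskip, pvG_eq_none _ (Option.map_eq_none_iff.mp hf')]

theorem pv_peelB_eq_G (st : List Char) (hd : ∀ c ∈ st, pvDomChar c = true) :
    pvPeelB st.reverse = (pvG (PySem.Chars.rstrip st)).reverse :=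
  pv_peelB_eq_G_aux st.length st le_rfl hd

-- ===== VERDICT (by name: the statement is the Claim_ definition above) =====
theorem normalise_stem_py_spec : Claim_equal_normalise_stem_py := by
  intro name hdom
  unfold Spec_normalise_stem_py normalise_stem_py normalise_stem_py_alt
  have hdom' : ∀ c ∈ name.toList, pvDomChar c = true := by
    simpa [Dom_normalise_stem_py, pvDomStr, List.all_eq_true] using hdom
  have hdc : ∀ c ∈ PySem.Chars.lower name.toList, pvDomChar c = true := by
    intro c hc
    rw [PySem.Chars.lower] at hc
    obtain ⟨d, hd, rfl⟩ := List.mem_map.mp hc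
    exact pv_lowerChar_dom d (hdom' d hd)
  have hdl : ∀ c ∈ PySem.Chars.lstrip (PySem.Chars.lower name.toList), pvDomChar c = true :=
    fun c hc => hdc c ((List.dropWhile_sublist _).mem hc)
  have hB := pv_peelB_eq_G (PySem.Chars.lstrip (PySem.Chars.lower name.toList)) hdl
  have hstrip : PySem.Chars.rstrip (PySem.Chars.lstrip (PySem.Chars.lower name.toList))
      = PySem.Chars.strip (PySem.Chars.lower name.toList) := rfl
  rw [hstrip] at hB
  rw [hB, List.reverse_reverse]
  have h1 : PySem.Chars.lstrip (PySem.Chars.strip (PySem.Chars.lower name.toList))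
      = PySem.Chars.strip (PySem.Chars.lower name.toList) := by
    rw [← hstrip]
    exact pv_lstrip_rstrip _ (List.dropWhile_idempotent _ _)
  have h2 := pv_rstrip_idem (PySem.Chars.lstrip (PySem.Chars.lower name.toList))
  rw [hstrip] at h2
  exact congrArg String.ofList (pv_loopA_eq_G _ h1 h2)
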